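-- pv_equiv track=rewrite | github.com/NarasimhaSaladi/cses | sliding_window/B_Total_Length.py | solve
-- ===== SOURCE A (Python) =====
-- def solve(n, s, arr):
--     total = 0  # sum of lengths of all good segments
--     curr_sum = 0  # current segment sum
--     # For each ending position
--     i=0
--     j=0
--     while j<n:
--         curr_sum += arr[j]
--
--         # While sum exceeds s, shrink the window
--         while curr_sum > s:
--             curr_sum -= arr[i]
--             i += 1
--
--         # If current segment is good, add its contribution
--             # Add lengths of all valid segments ending at current right
--         total += (j - i + 1)*((j-i+1)+1)//2
--         j += 1
--
--     return total
-- ===== SOURCE B (Python) =====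
-- def solve(n, s, arr):
--     # Sqrt-decomposition over the prefix-sum array: block maxima let the left-boundary
--     # search jump over whole blocks whose best prefix value is still below the threshold.
--     pre = [0]
--     acc = 0
--     for x in arr:
--         acc += x
--         pre.append(acc)
--     m = len(pre)
--     bs = 1
--     while (bs + 1) * (bs + 1) <= m:
--         bs += 1
--     bmax = []
--     for b in range(0, m, bs):
--         bmax.append(max(pre[b:b + bs]))
--     total = 0
--     i = 0
--     for j in range(n):
--         need = pre[j + 1] - s
--         while True:
--             if i % bs == 0 and i // bs < len(bmax) and bmax[i // bs] < need:
--                 i += bs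
--             else:
--                 if pre[i] >= need:
--                     break
--                 i += 1
--         L = j - i + 1
--         total += L * (L + 1) // 2
--     return total
-- ===== Notes on version B (the rewrite author's own statement) =====
-- stated objective: alternative
-- what changed: B precomputes the prefix-sum array plus sqrt-decomposition block maxima over it, and finds each window's left boundary by jumping over whole blocks whose maximum prefix value is below the threshold pre[j+1]-s, instead of A's two-pointer running window sum mutated by adding arr[j] and subtracting arr[i]; the per-window contribution is the triangular number of the window length in both.
import Mathlib
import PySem

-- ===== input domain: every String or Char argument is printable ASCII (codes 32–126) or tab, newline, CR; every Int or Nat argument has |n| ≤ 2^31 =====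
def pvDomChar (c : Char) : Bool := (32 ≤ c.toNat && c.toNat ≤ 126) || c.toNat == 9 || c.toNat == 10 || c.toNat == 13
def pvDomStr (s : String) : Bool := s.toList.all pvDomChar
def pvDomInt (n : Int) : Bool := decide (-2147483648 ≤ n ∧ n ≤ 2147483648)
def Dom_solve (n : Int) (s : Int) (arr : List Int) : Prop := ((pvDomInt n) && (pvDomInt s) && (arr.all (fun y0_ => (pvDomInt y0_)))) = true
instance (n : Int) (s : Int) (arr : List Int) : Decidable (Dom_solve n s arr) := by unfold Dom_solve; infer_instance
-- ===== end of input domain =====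

-- B replaces A's running-window sum (mutated by adding arr[j] and subtracting arr[i]) by a
-- precomputed prefix-sum array with sqrt-decomposition block maxima: the left-boundary search
-- jumps over whole blocks whose maximum prefix value is below the threshold; alternative
-- structure, same asymptotic cost.


-- ===== PORT A =====
-- inner `while curr_sum > s: curr_sum -= arr[i]; i += 1`; none = IndexError
def solveDrainA (s : Int) (arr : List Int) (i curr : Int) : Option (Int × Int) :=
  if curr > s then
    match h : PySem.List.pyGet? arr i with
    | none => none
    | some v => solveDrainA s arr (i + 1) (curr - v)
  else some (i, curr)
termination_by (arr.length + 1 - i).toNat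
decreasing_by
  have hne : PySem.List.pyGet? arr i ≠ none := by simp [h]
  rw [Ne, PySem.List.pyGet?_eq_none_iff, not_not] at hne
  simp [PySem.Raise.InRange] at hne
  omega

-- outer `while j < n` loop, state (j, i, curr_sum, total); none = IndexError
def solveLoopA (n s : Int) (arr : List Int) (j i curr total : Int) : Option Int :=
  if j < n then
    match PySem.List.pyGet? arr j with
    | none => none
    | some v =>
      match solveDrainA s arr i (curr + v) with
      | none => none
      | some (i', curr') =>
        solveLoopA n s arr (j + 1) i' curr'
          (total + PySem.Int.floordiv ((j - i' + 1) * ((j - i' + 1) + 1)) 2)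
  else some total
termination_by (n - j).toNat
decreasing_by omega

def solve (n : Int) (s : Int) (arr : List Int) : Int :=
  (solveLoopA n s arr 0 0 0 0).getD 0

-- ===== PORT B =====
-- pre = [0]; acc = 0; for x in arr: acc += x; pre.append(acc)
def solvePreB (arr : List Int) : List Int :=
  (arr.foldl (fun st x => (st.1 ++ [st.2 + x], st.2 + x)) ([0], 0)).1

-- bs = 1; while (bs+1)*(bs+1) <= m: bs += 1   (integer sqrt; fuel = m bounds the loop,
-- which runs isqrt(m)-1 < m times, so the fuel never runs out on a real call)
def solveBsGo : Nat → Int → Int → Int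
  | 0, _, bs => bs
  | f + 1, m, bs => if (bs + 1) * (bs + 1) ≤ m then solveBsGo f m (bs + 1) else bs

-- bmax = []; for b in range(0, m, bs): bmax.append(max(pre[b:b+bs]))
-- (the slice is nonempty at every b the range yields, so Python's max never raises;
-- the .getD 0 on max? is therefore never the value used)
def solveBmaxB (pre : List Int) (bs : Int) : List Int :=
  (PySem.List.pyRange 0 (pre.length : Int) bs).foldl
    (fun acc b =>
      acc ++ [(PySem.List.max? (PySem.List.slice pre (some b) (some (b + bs))) (fun y => y)).getD 0])
    []

-- the inner `while True:` search; faithful for i ≥ 0 and bs ≥ 1, the only reachable states: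
-- `i // bs < len(bmax) and bmax[i//bs] < need` is the guarded pyGetD, `pre[i]` the pyGet?
-- (none = IndexError); the fuel passed by solveLoopB exceeds the maximal iteration count
def solveFindFast (pre bmax : List Int) (bs need : Int) : Nat → Int → Option Int
  | 0, _ => none
  | f + 1, i =>
    if PySem.Int.mod i bs = 0 ∧ PySem.Int.floordiv i bs < (bmax.length : Int) ∧
        PySem.List.pyGetD bmax (PySem.Int.floordiv i bs) 0 < need then
      solveFindFast pre bmax bs need f (i + bs)
    else
      match PySem.List.pyGet? pre i with
      | none => none
      | some p =>
        if need ≤ p then some i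
        else solveFindFast pre bmax bs need f (i + 1)

-- `for j in range(n)` loop, state (j, i, total); none = IndexError
def solveLoopB (n s : Int) (pre : List Int) (bs : Int) (bmax : List Int)
    (j i total : Int) : Option Int :=
  if j < n then
    match PySem.List.pyGet? pre (j + 1) with
    | none => none
    | some pj =>
      match solveFindFast pre bmax bs (pj - s) ((pre.length : Int) + bs + 1).toNat i with
      | none => none
      | some i' =>
        let L := j - i' + 1
        solveLoopB n s pre bs bmax (j + 1) i' (total + PySem.Int.floordiv (L * (L + 1)) 2)
  else some total
termination_by (n - j).toNat
decreasing_by omega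

def solve_alt (n : Int) (s : Int) (arr : List Int) : Int :=
  let pre := solvePreB arr
  let bs := solveBsGo pre.length (pre.length : Int) 1
  let bmax := solveBmaxB pre bs
  (solveLoopB n s pre bs bmax 0 0 0).getD 0

-- ===== PRECONDITION & SPEC =====
-- Pre_ excludes exactly the inputs on which A raises IndexError: n beyond the list's length,
-- or some right endpoint j < n whose window sum exceeds s for every possible left boundary
-- (possible only when s < 0), which drives the shrinking index past the end of arr.
def Pre_solve (n : Int) (s : Int) (arr : List Int) : Prop :=
  n ≤ arr.length ∧
    ∀ j ∈ PySem.List.pyRange 0 n 1, ∃ i ∈ PySem.List.pyRange 0 ((arr.length : Int) + 1) 1,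
      (arr.take (j + 1).toNat).sum - (arr.take i.toNat).sum ≤ s
instance (n : Int) (s : Int) (arr : List Int) : Decidable (Pre_solve n s arr) := by
  unfold Pre_solve; infer_instance

def pvWitness_solve : Int × Int × List Int := (2, 3, [1, 2, 5])

def Spec_solve (n : Int) (s : Int) (arr : List Int) (out : Int) : Prop := out = solve_alt n s arr
instance (n : Int) (s : Int) (arr : List Int) (out : Int) : Decidable (Spec_solve n s arr out) := by
  unfold Spec_solve; infer_instance

-- ===== CLAIM (what is proved, stated in full; the proofs are below) =====
def Claim_equal_solve : Prop := ∀ (n : Int) (s : Int) (arr : List Int), Dom_solve n s arr → Pre_solve n s arr → Spec_solve n s arr (solve n s arr)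

-- ===== LEMMAS AND PROOFS =====

-- proof-only linear reference search: first index i' ≥ i with pre[i'] ≥ need
def solveFindB (pre : List Int) (need i : Int) : Option Int :=
  match h : PySem.List.pyGet? pre i with
  | none => none
  | some p => if p < need then solveFindB pre need (i + 1) else some i
termination_by (pre.length + 1 - i).toNat
decreasing_by
  have hne : PySem.List.pyGet? pre i ≠ none := by simp [h]
  rw [Ne, PySem.List.pyGet?_eq_none_iff, not_not] at hne
  simp [PySem.Raise.InRange] at hne
  omega

def solvePf (arr : List Int) (k : Int) : Int := (arr.take k.toNat).sum

theorem preB_gen (arr : List Int) : ∀ (p : List Int) (a : Int),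
    arr.foldl (fun st x => (st.1 ++ [st.2 + x], st.2 + x)) (p, a) =
      (p ++ (List.range arr.length).map (fun k => a + (arr.take (k + 1)).sum), a + arr.sum) := by
  induction arr with
  | nil => simp
  | cons x t ih =>
    intro p a
    simp only [List.foldl_cons, ih]
    refine Prod.ext ?_ (by simp; ring)
    simp [List.range_succ_eq_map, List.map_map, Function.comp, List.append_assoc]
    intro k _
    ring

theorem preB_spec (arr : List Int) :
    solvePreB arr = (List.range (arr.length + 1)).map (fun k => (arr.take k).sum) := by
  simp [solvePreB, preB_gen, List.range_succ_eq_map, List.map_map, Function.comp]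

theorem pre_get (arr : List Int) (k : Int) (h0 : 0 ≤ k) :
    PySem.List.pyGet? (solvePreB arr) k =
      if k ≤ arr.length then some (solvePf arr k) else none := by
  rw [PySem.List.pyGet?_of_nonneg _ h0, preB_spec]
  rcases le_or_gt k arr.length with h | h
  · rw [if_pos h]
    rw [List.getElem?_map, List.getElem?_range (by omega)]
    simp [solvePf]
  · rw [if_neg (by omega)]
    rw [List.getElem?_map, List.getElem?_eq_none (by simpa using by omega)]
    simp

theorem pf_succ (arr : List Int) (i : Int) (h0 : 0 ≤ i) (h1 : i < arr.length) :
    solvePf arr (i + 1) = solvePf arr i + arr[i.toNat]'(by omega) := by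
  have h2 : (i + 1).toNat = i.toNat + 1 := by omega
  unfold solvePf
  rw [h2, List.take_add_one, List.sum_append,
    List.getElem?_eq_getElem (show i.toNat < arr.length by omega)]
  simp

theorem drainA_stop (s : Int) (arr : List Int) (i curr : Int) (h : ¬ curr > s) :
    solveDrainA s arr i curr = some (i, curr) := by
  rw [solveDrainA, if_neg h]

theorem drainA_none (s : Int) (arr : List Int) (i curr : Int) (hc : curr > s)
    (h : PySem.List.pyGet? arr i = none) : solveDrainA s arr i curr = none := by
  rw [solveDrainA, if_pos hc, h]

theorem drainA_go (s : Int) (arr : List Int) (i curr v : Int) (hc : curr > s)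
    (h : PySem.List.pyGet? arr i = some v) :
    solveDrainA s arr i curr = solveDrainA s arr (i + 1) (curr - v) := by
  rw [solveDrainA, if_pos hc, h]

theorem findB_none (pre : List Int) (need i : Int) (h : PySem.List.pyGet? pre i = none) :
    solveFindB pre need i = none := by
  rw [solveFindB, h]

theorem findB_step (pre : List Int) (need i p : Int) (h : PySem.List.pyGet? pre i = some p) :
    solveFindB pre need i = if p < need then solveFindB pre need (i + 1) else some i := by
  rw [solveFindB, h]

theorem drain_eq (s T : Int) (arr : List Int) :
    ∀ (fuel : Nat) (i : Int), 0 ≤ i → i ≤ arr.length → (arr.length - i).toNat ≤ fuel →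
    solveDrainA s arr i (T - solvePf arr i) =
      (solveFindB (solvePreB arr) (T - s) i).map (fun i' => (i', T - solvePf arr i')) := by
  intro fuel
  induction fuel with
  | zero =>
    intro i h0 hle hf
    have hpre : PySem.List.pyGet? (solvePreB arr) i = some (solvePf arr i) := by
      rw [pre_get arr i h0, if_pos hle]
    rw [findB_step _ _ _ _ hpre]
    by_cases hc : T - solvePf arr i > s
    · have hA : PySem.List.pyGet? arr i = none := by
        rw [PySem.List.pyGet?_of_nonneg _ h0]
        exact List.getElem?_eq_none (by omega)
      rw [drainA_none _ _ _ _ hc hA, if_pos (by omega : solvePf arr i < T - s)]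
      rw [findB_none _ _ _ (by rw [pre_get arr (i+1) (by omega), if_neg (by omega)])]
      simp
    · rw [drainA_stop _ _ _ _ hc, if_neg (by omega : ¬ solvePf arr i < T - s)]
      simp
  | succ m ih =>
    intro i h0 hle hf
    have hpre : PySem.List.pyGet? (solvePreB arr) i = some (solvePf arr i) := by
      rw [pre_get arr i h0, if_pos hle]
    rw [findB_step _ _ _ _ hpre]
    by_cases hc : T - solvePf arr i > s
    · rw [if_pos (by omega : solvePf arr i < T - s)]
      by_cases hil : i < arr.length
      · have hA : PySem.List.pyGet? arr i = some (arr[i.toNat]'(by omega)) :=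
          PySem.List.pyGet?_eq_some_getElem arr h0 (by omega)
        rw [drainA_go _ _ _ _ _ hc hA]
        have hv : T - solvePf arr i - arr[i.toNat]'(by omega) = T - solvePf arr (i + 1) := by
          rw [pf_succ arr i h0 hil]; ring
        rw [hv]
        exact ih (i + 1) (by omega) (by omega) (by omega)
      · have hA : PySem.List.pyGet? arr i = none := by
          rw [PySem.List.pyGet?_of_nonneg _ h0]
          exact List.getElem?_eq_none (by omega)
        rw [drainA_none _ _ _ _ hc hA]
        rw [findB_none _ _ _ (by rw [pre_get arr (i+1) (by omega), if_neg (by omega)])]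
        simp
    · rw [drainA_stop _ _ _ _ hc, if_neg (by omega : ¬ solvePf arr i < T - s)]
      simp

theorem findB_some_bounds (pre : List Int) (need : Int) :
    ∀ (fuel : Nat) (i i' : Int), 0 ≤ i → (pre.length + 1 - i).toNat ≤ fuel →
      solveFindB pre need i = some i' → i ≤ i' ∧ PySem.List.pyGet? pre i' ≠ none := by
  intro fuel
  induction fuel with
  | zero =>
    intro i i' h0 hf h
    rw [findB_none _ _ _ (by rw [PySem.List.pyGet?_of_nonneg _ h0]; exact List.getElem?_eq_none (by omega))] at h
    exact absurd h (by simp)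
  | succ m ih =>
    intro i i' h0 hf h
    cases hg : PySem.List.pyGet? pre i with
    | none => rw [findB_none _ _ _ hg] at h; exact absurd h (by simp)
    | some p =>
      rw [findB_step _ _ _ _ hg] at h
      by_cases hp : p < need
      · rw [if_pos hp] at h
        have hnn : (pre.length : Int) ≤ i → False := by
          intro hge
          rw [findB_none _ _ _ (by rw [PySem.List.pyGet?_of_nonneg _ (by omega)]; exact List.getElem?_eq_none (by omega))] at h
          exact absurd h (by simp)
        have hlt : i < (pre.length : Int) := by by_contra hx; exact hnn (by omega)
        obtain ⟨h1, h2⟩ := ih (i + 1) i' (by omega) (by omega) h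
        exact ⟨by omega, h2⟩
      · rw [if_neg hp] at h
        cases h
        exact ⟨le_refl _, by simp [hg]⟩

-- ---- B-side: the block structure ----

theorem bsGo_ge : ∀ (f : Nat) (m bs : Int), bs ≤ solveBsGo f m bs := by
  intro f
  induction f with
  | zero => intro m bs; simp [solveBsGo]
  | succ g ih =>
    intro m bs
    rw [solveBsGo]
    split_ifs with h
    · exact le_trans (by omega) (ih m (bs + 1))
    · exact le_refl _

theorem bmax_eq_map (pre : List Int) (bs : Int) :
    solveBmaxB pre bs = (PySem.List.pyRange 0 (pre.length : Int) bs).map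
      (fun b => (PySem.List.max? (PySem.List.slice pre (some b) (some (b + bs))) (fun y => y)).getD 0) := by
  unfold solveBmaxB
  rw [PySem.List.foldl_append_singleton_eq_map]
  simp

theorem bmax_len (pre : List Int) (bs : Int) (hbs : 0 < bs) (q : Nat) :
    (q : Int) < ((solveBmaxB pre bs).length : Int) ↔ (q : Int) * bs < (pre.length : Int) := by
  rw [bmax_eq_map, List.length_map, PySem.List.pyRange_of_pos _ _ hbs, List.length_map,
    List.length_range]
  simp only [sub_zero]
  by_cases hm : (0:Int) < (pre.length : Int)
  · rw [if_pos hm]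
    have htn : (((((pre.length : Int) + bs - 1) / bs).toNat : Int)) = ((pre.length : Int) + bs - 1) / bs := by
      have : (0:Int) ≤ ((pre.length : Int) + bs - 1) / bs := Int.ediv_nonneg (by omega) (by omega)
      omega
    constructor
    · intro h
      have h2 : (q : Int) < ((pre.length : Int) + bs - 1) / bs := by omega
      have h3 : ((q : Int) + 1) * bs ≤ (pre.length : Int) + bs - 1 :=
        (Int.le_ediv_iff_mul_le hbs).mp (by omega)
      nlinarith
    · intro h
      have h3 : ((q : Int) + 1) * bs ≤ (pre.length : Int) + bs - 1 := by nlinarith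
      have h2 : (q : Int) + 1 ≤ ((pre.length : Int) + bs - 1) / bs :=
        (Int.le_ediv_iff_mul_le hbs).mpr h3
      omega
  · rw [if_neg hm]
    constructor
    · intro h; omega
    · intro h
      have h1 : (0:Int) ≤ (q : Int) * bs := mul_nonneg (by positivity) (by omega)
      omega

theorem bmax_getD (pre : List Int) (bs : Int) (hbs : 0 < bs) (q : Nat)
    (hq : (q : Int) < ((solveBmaxB pre bs).length : Int)) :
    PySem.List.pyGetD (solveBmaxB pre bs) (q : Int) 0 =
      (PySem.List.max? (PySem.List.slice pre (some ((q : Int) * bs)) (some ((q : Int) * bs + bs)))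
        (fun y => y)).getD 0 := by
  rw [PySem.List.pyGetD_natCast]
  rw [bmax_eq_map] at hq ⊢
  rw [PySem.List.pyRange_of_pos _ _ hbs] at hq ⊢
  rw [List.length_map, List.length_map, List.length_range] at hq
  have hqlt : q < (if (0:Int) < (pre.length : Int) then ((((pre.length : Int)) - 0 + bs - 1) / bs).toNat else 0) := by
    exact_mod_cast hq
  rw [List.getD_eq_getElem _ _ (by simpa using hqlt)]
  simp [List.getElem_map, List.getElem_range]
  ring_nf

-- every in-range element of block q lies in the slice the block max was taken over
theorem mem_block_slice (pre : List Int) (a bs u : Int) (hbs : 0 < bs) (h0 : 0 ≤ a)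
    (hau : a ≤ u) (hub : u < a + bs) (hum : u < (pre.length : Int)) :
    pre[u.toNat]'(by omega) ∈ PySem.List.slice pre (some a) (some (a + bs)) := by
  rw [PySem.List.slice_toNat _ h0 (by omega)]
  have hidx : u.toNat - a.toNat < ((pre.drop a.toNat).take ((a + bs).toNat - a.toNat)).length := by
    simp [List.length_take, List.length_drop]
    omega
  have hget : ((pre.drop a.toNat).take ((a + bs).toNat - a.toNat))[u.toNat - a.toNat]'hidx =
      pre[u.toNat]'(by omega) := by
    rw [List.getElem_take, List.getElem_drop]
    congr 1
    omega
  rw [← hget]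
  exact List.getElem_mem hidx

-- the linear search is unchanged by stepping over one below-threshold (or out-of-range) index
theorem lin_step_lt (pre : List Int) (need k : Int) (h0 : 0 ≤ k)
    (h : ∀ p, PySem.List.pyGet? pre k = some p → p < need) :
    solveFindB pre need k = solveFindB pre need (k + 1) := by
  cases hg : PySem.List.pyGet? pre k with
  | none =>
    rw [findB_none _ _ _ hg]
    have hk : (pre.length : Int) ≤ k := by
      rw [PySem.List.pyGet?_eq_none_iff] at hg
      simp [PySem.Raise.InRange] at hg
      omega
    rw [findB_none _ _ _ (by
      rw [PySem.List.pyGet?_of_nonneg _ (by omega)]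
      exact List.getElem?_eq_none (by omega))]
  | some p =>
    rw [findB_step _ _ _ _ hg, if_pos (h p hg)]

theorem lin_skip (pre : List Int) (need : Int) :
    ∀ (t : Nat) (k : Int), 0 ≤ k →
      (∀ u p, k ≤ u → u < k + (t : Int) → PySem.List.pyGet? pre u = some p → p < need) →
      solveFindB pre need k = solveFindB pre need (k + (t : Int)) := by
  intro t
  induction t with
  | zero => intro k _ _; simp
  | succ g ih =>
    intro k h0 h
    rw [lin_step_lt pre need k h0 (fun p hp => h k p le_rfl (by omega) hp)]
    rw [ih (k + 1) (by omega) (fun u p hu1 hu2 hp => h u p (by omega) (by omega) hp)]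
    congr 1
    omega

-- the block-jumping search computes the linear search's answer
theorem fast_eq_lin (pre : List Int) (bs need : Int) (hbs : 0 < bs) :
    ∀ (fuel : Nat) (i : Int), 0 ≤ i → ((pre.length : Int) + bs - i).toNat < fuel →
      solveFindFast pre (solveBmaxB pre bs) bs need fuel i = solveFindB pre need i := by
  intro fuel
  induction fuel with
  | zero => intro i _ hf; omega
  | succ f ih =>
    intro i h0 hf
    rw [solveFindFast]
    by_cases hC : PySem.Int.mod i bs = 0 ∧
        PySem.Int.floordiv i bs < (((solveBmaxB pre bs).length : Nat) : Int) ∧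
        PySem.List.pyGetD (solveBmaxB pre bs) (PySem.Int.floordiv i bs) 0 < need
    · rw [if_pos hC]
      obtain ⟨hm0, hlen, hx⟩ := hC
      have hq0 : 0 ≤ PySem.Int.floordiv i bs :=
        (PySem.Int.le_floordiv_iff_mul_le hbs).mpr (by omega)
      set q := PySem.Int.floordiv i bs with hqdef
      have hi : q * bs = i := by
        have := PySem.Int.floordiv_mul_add_mod i bs
        rw [← hqdef] at this
        omega
      have hqn : ((q.toNat : Nat) : Int) = q := by omega
      have hqlen : ((q.toNat : Nat) : Int) < ((solveBmaxB pre bs).length : Int) := by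
        rw [hqn]; exact hlen
      have him : i < (pre.length : Int) := by
        have := (bmax_len pre bs hbs q.toNat).mp hqlen
        rw [hqn, hi] at this
        exact this
      have hxv : PySem.List.pyGetD (solveBmaxB pre bs) q 0 =
          (PySem.List.max? (PySem.List.slice pre (some i) (some (i + bs))) (fun y => y)).getD 0 := by
        rw [← hqn, bmax_getD pre bs hbs q.toNat hqlen, hqn, hi]
      -- the slice is nonempty, so max? is some mx with mx < need
      have hmem : pre[i.toNat]'(by omega) ∈ PySem.List.slice pre (some i) (some (i + bs)) :=
        mem_block_slice pre i bs i hbs h0 le_rfl (by omega) him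
      cases hmx : PySem.List.max? (PySem.List.slice pre (some i) (some (i + bs))) (fun y => y) with
      | none =>
        rw [PySem.List.max?_eq_none_iff] at hmx
        rw [hmx] at hmem
        exact absurd hmem (List.not_mem_nil)
      | some mx =>
        have hmxlt : mx < need := by rw [hxv, hmx] at hx; simpa using hx
        have hall : ∀ u p, i ≤ u → u < i + bs → PySem.List.pyGet? pre u = some p → p < need := by
          intro u p hu1 hu2 hp
          have hu0 : 0 ≤ u := by omega
          have hum : u < (pre.length : Int) := by
            by_contra hx2
            rw [PySem.List.pyGet?_of_nonneg _ hu0, List.getElem?_eq_none (by omega)] at hp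
            exact absurd hp (by simp)
          have hpv : p = pre[u.toNat]'(by omega) := by
            rw [PySem.List.pyGet?_eq_some_getElem pre hu0 (by omega)] at hp
            exact (Option.some_inj.mp hp).symm
          have hm2 : pre[u.toNat]'(by omega) ∈ PySem.List.slice pre (some i) (some (i + bs)) :=
            mem_block_slice pre i bs u hbs h0 hu1 hu2 hum
          have := PySem.List.max?_isMax hmx _ hm2
          simp at this
          omega
        have hskip : solveFindB pre need i = solveFindB pre need (i + bs) := by
          have hbt : ((bs.toNat : Nat) : Int) = bs := by omega
          have := lin_skip pre need bs.toNat i h0 (by rw [hbt]; exact hall)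
          rw [hbt] at this
          exact this
        rw [hskip]
        exact (ih (i + bs) (by omega) (by omega))
    · rw [if_neg hC]
      cases hg : PySem.List.pyGet? pre i with
      | none => rw [findB_none _ _ _ hg]
      | some p =>
        have him : i < (pre.length : Int) := by
          by_contra hx2
          rw [PySem.List.pyGet?_of_nonneg _ h0, List.getElem?_eq_none (by omega)] at hg
          exact absurd hg (by simp)
        rw [findB_step _ _ _ _ hg]
        show (if need ≤ p then some i else solveFindFast pre (solveBmaxB pre bs) bs need f (i + 1)) =
            if p < need then solveFindB pre need (i + 1) else some i
        by_cases hp : need ≤ p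
        · rw [if_pos hp, if_neg (by omega)]
        · rw [if_neg hp, if_pos (by omega)]
          exact ih (i + 1) (by omega) (by omega)

theorem loopA_end (n s : Int) (arr : List Int) (j i curr total : Int) (h : ¬ j < n) :
    solveLoopA n s arr j i curr total = some total := by
  rw [solveLoopA, if_neg h]

theorem loopA_noneJ (n s : Int) (arr : List Int) (j i curr total : Int) (h : j < n)
    (hv : PySem.List.pyGet? arr j = none) : solveLoopA n s arr j i curr total = none := by
  rw [solveLoopA, if_pos h, hv]

theorem loopA_step (n s : Int) (arr : List Int) (j i curr total v : Int) (h : j < n)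
    (hv : PySem.List.pyGet? arr j = some v) :
    solveLoopA n s arr j i curr total =
      match solveDrainA s arr i (curr + v) with
      | none => none
      | some (i', curr') =>
        solveLoopA n s arr (j + 1) i' curr'
          (total + PySem.Int.floordiv ((j - i' + 1) * ((j - i' + 1) + 1)) 2) := by
  rw [solveLoopA, if_pos h, hv]

theorem loopB_end (n s : Int) (pre : List Int) (bs : Int) (bmax : List Int) (j i total : Int)
    (h : ¬ j < n) : solveLoopB n s pre bs bmax j i total = some total := by
  rw [solveLoopB, if_neg h]

theorem loopB_noneJ (n s : Int) (pre : List Int) (bs : Int) (bmax : List Int) (j i total : Int)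
    (h : j < n) (hp : PySem.List.pyGet? pre (j + 1) = none) :
    solveLoopB n s pre bs bmax j i total = none := by
  rw [solveLoopB, if_pos h, hp]

theorem loopB_step (n s : Int) (pre : List Int) (bs : Int) (bmax : List Int)
    (j i total pj : Int) (h : j < n) (hp : PySem.List.pyGet? pre (j + 1) = some pj) :
    solveLoopB n s pre bs bmax j i total =
      match solveFindFast pre bmax bs (pj - s) ((pre.length : Int) + bs + 1).toNat i with
      | none => none
      | some i' =>
        solveLoopB n s pre bs bmax (j + 1) i'
          (total + PySem.Int.floordiv ((j - i' + 1) * ((j - i' + 1) + 1)) 2) := by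
  rw [solveLoopB, if_pos h, hp]

theorem loop_eq (n s : Int) (arr : List Int) (bs : Int) (hbs : 0 < bs) :
    ∀ (fuel : Nat) (j i total : Int), 0 ≤ j → 0 ≤ i → i ≤ arr.length → (n - j).toNat ≤ fuel →
      solveLoopA n s arr j i (solvePf arr j - solvePf arr i) total =
        solveLoopB n s (solvePreB arr) bs (solveBmaxB (solvePreB arr) bs) j i total := by
  intro fuel
  induction fuel with
  | zero =>
    intro j i total hj0 hi0 hil hf
    have hj : ¬ j < n := by omega
    rw [loopA_end _ _ _ _ _ _ _ hj, loopB_end _ _ _ _ _ _ _ _ hj]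
  | succ m ih =>
    intro j i total hj0 hi0 hil hf
    by_cases hj : j < n
    · by_cases hjl : j < arr.length
      · have hv : PySem.List.pyGet? arr j = some (arr[j.toNat]'(by omega)) :=
          PySem.List.pyGet?_eq_some_getElem arr hj0 (by omega)
        have hp : PySem.List.pyGet? (solvePreB arr) (j + 1) = some (solvePf arr (j + 1)) := by
          rw [pre_get arr (j + 1) (by omega), if_pos (by omega)]
        rw [loopA_step _ _ _ _ _ _ _ _ hj hv, loopB_step _ _ _ _ _ _ _ _ _ hj hp]
        have hcur : solvePf arr j - solvePf arr i + arr[j.toNat]'(by omega) =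
            solvePf arr (j + 1) - solvePf arr i := by
          rw [pf_succ arr j hj0 hjl]; ring
        rw [hcur, drain_eq s (solvePf arr (j + 1)) arr (arr.length - i).toNat i hi0 hil (le_refl _)]
        rw [fast_eq_lin (solvePreB arr) bs (solvePf arr (j + 1) - s) hbs _ i hi0 (by omega)]
        cases hfb : solveFindB (solvePreB arr) (solvePf arr (j + 1) - s) i with
        | none => simp
        | some i' =>
          obtain ⟨hii', hne⟩ := findB_some_bounds (solvePreB arr) (solvePf arr (j + 1) - s)
            (((solvePreB arr).length + 1 - i).toNat) i i' hi0 (le_refl _) hfb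
          have hi'0 : 0 ≤ i' := by omega
          have hi'len : i' ≤ arr.length := by
            by_contra hx
            exact hne (by rw [pre_get arr i' hi'0, if_neg (by omega)])
          simp only [Option.map_some]
          exact ih (j + 1) i' _ (by omega) hi'0 hi'len (by omega)
      · have hv : PySem.List.pyGet? arr j = none := by
          rw [PySem.List.pyGet?_of_nonneg _ hj0]; exact List.getElem?_eq_none (by omega)
        have hp : PySem.List.pyGet? (solvePreB arr) (j + 1) = none := by
          rw [pre_get arr (j + 1) (by omega), if_neg (by omega)]
        rw [loopA_noneJ _ _ _ _ _ _ _ hj hv, loopB_noneJ _ _ _ _ _ _ _ _ hj hp]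
    · have hj' : ¬ j < n := hj
      rw [loopA_end _ _ _ _ _ _ _ hj', loopB_end _ _ _ _ _ _ _ _ hj']

theorem solve_eq_alt (n s : Int) (arr : List Int) : solve n s arr = solve_alt n s arr := by
  unfold solve solve_alt
  have hbs : (0:Int) < solveBsGo (solvePreB arr).length ((solvePreB arr).length : Int) 1 :=
    lt_of_lt_of_le (by omega) (bsGo_ge _ _ 1)
  have h := loop_eq n s arr _ hbs n.toNat 0 0 0 (le_refl _) (le_refl _) (by simp) (by omega)
  simp only [solvePf, Int.toNat_zero, List.take_zero, List.sum_nil, sub_self] at h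
  rw [h]

-- ===== VERDICT (by name: the statement is the Claim_ definition above) =====
theorem solve_spec : Claim_equal_solve := by
  intro n s arr _ _
  unfold Spec_solve
  exact solve_eq_alt n s arr
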